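-- pv_equiv track=rewrite | github.com/IncioMan/Continuous-Integration-metrics-for-post-release-bugs-prediction | data_retrivers/burst_metrics_test.py | detect_build_bursts
-- ===== SOURCE A (Python) =====
-- def detect_build_bursts(_builds, gap_size,\
--                         burst_size, states):
--     positive_count = 0
--     #used to count the gap size
--     negative_count = 0
--     n_bursts = 0
--     burst_sizes = []
--     i = 0
--     for row in _builds:
--         i+=1
--         #not part of the burst
--         if (not (row["state"] in states)):
--             negative_count+=1
--             #check if burst is terminated
--             if(negative_count == gap_size):
--                 if(positive_count >= burst_size):
--                     n_bursts+=1
--                     burst_sizes.append(positive_count)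
--                 negative_count = 0
--                 positive_count = 0
--         #part of the burst
--         if(row["state"] in states):
--             positive_count+=1
--             negative_count = 0
--             #end of the loop
--             if(i == len(_builds)):
--                 if(positive_count >= burst_size):
--                     n_bursts+=1
--                     burst_sizes.append(positive_count)
--     return n_bursts, burst_sizes
-- ===== SOURCE B (Python) =====
-- def detect_build_bursts(_builds, gap_size, burst_size, states):
--     # Run-length encode the builds by whether each is in one of the tracked states.
--     runs = []
--     for row in _builds:
--         flag = row["state"] in states
--         if runs and runs[-1][0] == flag:
--             runs[-1][1] += 1
--         else:
--             runs.append([flag, 1])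
--     # Walk the maximal runs: an in-state run extends the current burst; an
--     # out-of-state run of at least gap_size builds closes it.  A burst cut off
--     # by a trailing gap shorter than gap_size is considered abandoned.
--     n_bursts = 0
--     burst_sizes = []
--     positive = 0
--     last_in = False
--     for flag, length in runs:
--         last_in = flag
--         if flag:
--             positive += length
--         elif gap_size >= 1 and length >= gap_size:
--             if positive >= burst_size:
--                 n_bursts += 1
--                 burst_sizes.append(positive)
--             positive = 0
--     if last_in and positive >= burst_size:
--         n_bursts += 1
--         burst_sizes.append(positive)
--     return n_bursts, burst_sizes
-- ===== Notes on version B (the rewrite author's own statement) =====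
-- stated objective: alternative
-- what changed: B replaces A's single pass with intertwined positive/negative counters and an index-based end-of-loop check by a two-phase decomposition: run-length encode the in-state flags, then walk the maximal runs, closing the open burst on any out-of-state run of at least gap_size builds and finalizing at the end only when the last run is in-state.
-- intended difference: When burst_size <= 0, gap_size >= 1 and the builds contain 2*gap_size consecutive out-of-state builds, A fires its gap check at every multiple of gap_size inside one out-of-state run and so appends spurious zero-length bursts after the first; B closes the burst once per out-of-state run, the intended reading of a gap. — e.g. on detect_build_bursts([[("state", "p")], [("state", "f")], [("state", "f")]], 1, 0, ["p"]): A returns (2, [1, 0]), B returns (1, [1])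
import Mathlib
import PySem

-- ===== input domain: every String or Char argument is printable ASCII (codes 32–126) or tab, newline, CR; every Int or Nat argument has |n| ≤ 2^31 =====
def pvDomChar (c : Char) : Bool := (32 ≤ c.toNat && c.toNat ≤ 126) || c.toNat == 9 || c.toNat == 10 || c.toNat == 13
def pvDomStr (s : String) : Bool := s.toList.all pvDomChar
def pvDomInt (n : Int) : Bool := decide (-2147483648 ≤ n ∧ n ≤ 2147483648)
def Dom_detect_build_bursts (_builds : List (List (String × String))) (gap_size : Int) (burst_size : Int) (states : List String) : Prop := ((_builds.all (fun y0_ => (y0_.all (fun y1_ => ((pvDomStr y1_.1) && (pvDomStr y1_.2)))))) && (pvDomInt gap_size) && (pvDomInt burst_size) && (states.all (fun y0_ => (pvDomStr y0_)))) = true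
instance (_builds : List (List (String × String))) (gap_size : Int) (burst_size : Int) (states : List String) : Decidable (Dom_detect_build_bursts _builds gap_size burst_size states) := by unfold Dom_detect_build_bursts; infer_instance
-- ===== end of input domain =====

-- B re-decomposes A's single pass as run-length encoding followed by a walk over the maximal
-- runs (objective: alternative); on the D_ corner below B closes a burst once per gap run where
-- A appends spurious zero-length bursts.

-- row["state"] in states (rows are Python dicts; Pre_ guarantees the key is present)
def pvInb (states : List String) (row : List (String × String)) : Bool :=
  states.contains (PySem.Dict.getD (PySem.Dict.mk row) "state" "")

-- ===== PORT A =====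
-- A's loop body: state = (positive_count, negative_count, n_bursts, burst_sizes, i)
def pvStepFull (gap_size burst_size n : Int)
    (s : Int × Int × Int × List Int × Int) (k : Bool) : Int × Int × Int × List Int × Int :=
  let i := s.2.2.2.2 + 1
  -- not part of the burst
  let t1 : Int × Int × Int × List Int :=
    if k = false then
      let neg := s.2.1 + 1
      if neg = gap_size then
        if s.1 ≥ burst_size then (0, 0, s.2.2.1 + 1, s.2.2.2.1 ++ [s.1])
        else (0, 0, s.2.2.1, s.2.2.2.1)
      else (s.1, neg, s.2.2.1, s.2.2.2.1)
    else (s.1, s.2.1, s.2.2.1, s.2.2.2.1)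
  -- part of the burst
  let t2 : Int × Int × Int × List Int :=
    if k = true then
      let pos := t1.1 + 1
      if i = n then
        if pos ≥ burst_size then (pos, 0, t1.2.2.1 + 1, t1.2.2.2 ++ [pos])
        else (pos, 0, t1.2.2.1, t1.2.2.2)
      else (pos, 0, t1.2.2.1, t1.2.2.2)
    else t1
  (t2.1, t2.2.1, t2.2.2.1, t2.2.2.2, i)

def detect_build_bursts (_builds : List (List (String × String))) (gap_size : Int) (burst_size : Int) (states : List String) : Int × List Int :=
  let n : Int := _builds.length
  let s := _builds.foldl (fun s row => pvStepFull gap_size burst_size n s (pvInb states row))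
    ((0:Int), (0:Int), (0:Int), ([] : List Int), (0:Int))
  (s.2.2.1, s.2.2.2.1)

-- ===== PORT B =====
-- phase 1 of Source B: run-length encode (runs kept in reverse; Source B appends/increments at the end)
def pvRleStep (acc : List (Bool × Int)) (k : Bool) : List (Bool × Int) :=
  match acc with
  | (k', c) :: rest => if k' == k then (k', c + 1) :: rest else (k, 1) :: (k', c) :: rest
  | [] => [(k, 1)]

-- phase 2 of Source B: walk one run; state = (positive, n_bursts, burst_sizes, last_in)
def pvStepB (gap_size burst_size : Int)
    (s : Int × Int × List Int × Bool) (run : Bool × Int) : Int × Int × List Int × Bool :=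
  if run.1 then (s.1 + run.2, s.2.1, s.2.2.1, true)
  else if 1 ≤ gap_size ∧ gap_size ≤ run.2 then
    if s.1 ≥ burst_size then ((0:Int), s.2.1 + 1, s.2.2.1 ++ [s.1], false)
    else ((0:Int), s.2.1, s.2.2.1, false)
  else (s.1, s.2.1, s.2.2.1, false)

def detect_build_bursts_alt (_builds : List (List (String × String))) (gap_size : Int) (burst_size : Int) (states : List String) : Int × List Int :=
  let runs := (_builds.foldl (fun acc row => pvRleStep acc (pvInb states row)) []).reverse
  let s := runs.foldl (pvStepB gap_size burst_size) ((0:Int), (0:Int), ([] : List Int), false)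
  if s.2.2.2 = true ∧ s.1 ≥ burst_size then (s.2.1 + 1, s.2.2.1 ++ [s.1]) else (s.2.1, s.2.2.1)

-- ===== PRECONDITION & SPEC =====
-- Pre_ excludes only rows without a "state" key, on which Python A raises KeyError.
def Pre_detect_build_bursts (_builds : List (List (String × String))) (gap_size : Int) (burst_size : Int) (states : List String) : Prop :=
  ∀ row ∈ _builds, ((PySem.Dict.mk row).get? "state").isSome = true
instance (_builds : List (List (String × String))) (gap_size : Int) (burst_size : Int) (states : List String) : Decidable (Pre_detect_build_bursts _builds gap_size burst_size states) := by unfold Pre_detect_build_bursts; infer_instance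

def pvWitness_detect_build_bursts : (List (List (String × String))) × Int × Int × List String :=
  ([[("state", "passed")], [("state", "failed")]], 1, 1, ["passed"])

-- When burst_size ≤ 0, gap_size ≥ 1 and the builds contain 2*gap_size consecutive out-of-state
-- builds, A fires its gap check at every multiple of gap_size inside one out-of-state run and so
-- appends spurious zero-length bursts after the first; B closes the burst once per out-of-state
-- run, the intended reading of a gap.
def D_detect_build_bursts (_builds : List (List (String × String))) (gap_size : Int) (burst_size : Int) (states : List String) : Prop :=
  1 ≤ gap_size ∧ burst_size ≤ 0 ∧
    ∃ n ∈ List.range (_builds.map (fun row => states.contains (PySem.Dict.getD (PySem.Dict.mk row) "state" ""))).length,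
      ((((_builds.map (fun row => states.contains (PySem.Dict.getD (PySem.Dict.mk row) "state" ""))).drop n).take (2 * gap_size).toNat).length = (2 * gap_size).toNat ∧
       (((_builds.map (fun row => states.contains (PySem.Dict.getD (PySem.Dict.mk row) "state" ""))).drop n).take (2 * gap_size).toNat).all (fun x => x = false) = true)
instance (_builds : List (List (String × String))) (gap_size : Int) (burst_size : Int) (states : List String) : Decidable (D_detect_build_bursts _builds gap_size burst_size states) := by unfold D_detect_build_bursts; infer_instance

def Spec_detect_build_bursts (_builds : List (List (String × String))) (gap_size : Int) (burst_size : Int) (states : List String) (out : Int × List Int) : Prop := ¬ D_detect_build_bursts _builds gap_size burst_size states → out = detect_build_bursts_alt _builds gap_size burst_size states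
instance (_builds : List (List (String × String))) (gap_size : Int) (burst_size : Int) (states : List String) (out : Int × List Int) : Decidable (Spec_detect_build_bursts _builds gap_size burst_size states out) := by unfold Spec_detect_build_bursts; infer_instance

def pvDiffWitness_detect_build_bursts : (List (List (String × String))) × Int × Int × List String :=
  ([[("state", "p")], [("state", "f")], [("state", "f")]], 1, 0, ["p"])
def pvDiffWitnessOut_detect_build_bursts : (Int × List Int) × (Int × List Int) :=
  ((2, [1, 0]), (1, [1]))

-- ===== CLAIM (what is proved, stated in full; the proofs are below) =====
def Claim_unchanged_detect_build_bursts : Prop := ∀ (_builds : List (List (String × String))) (gap_size : Int) (burst_size : Int) (states : List String), Dom_detect_build_bursts _builds gap_size burst_size states → Pre_detect_build_bursts _builds gap_size burst_size states → Spec_detect_build_bursts _builds gap_size burst_size states (detect_build_bursts _builds gap_size burst_size states)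
def Claim_changed_detect_build_bursts : Prop := Dom_detect_build_bursts (pvDiffWitness_detect_build_bursts.1) (pvDiffWitness_detect_build_bursts.2.1) (pvDiffWitness_detect_build_bursts.2.2.1) (pvDiffWitness_detect_build_bursts.2.2.2) ∧ Pre_detect_build_bursts (pvDiffWitness_detect_build_bursts.1) (pvDiffWitness_detect_build_bursts.2.1) (pvDiffWitness_detect_build_bursts.2.2.1) (pvDiffWitness_detect_build_bursts.2.2.2) ∧ D_detect_build_bursts (pvDiffWitness_detect_build_bursts.1) (pvDiffWitness_detect_build_bursts.2.1) (pvDiffWitness_detect_build_bursts.2.2.1) (pvDiffWitness_detect_build_bursts.2.2.2) ∧ detect_build_bursts (pvDiffWitness_detect_build_bursts.1) (pvDiffWitness_detect_build_bursts.2.1) (pvDiffWitness_detect_build_bursts.2.2.1) (pvDiffWitness_detect_build_bursts.2.2.2) = pvDiffWitnessOut_detect_build_bursts.1 ∧ detect_build_bursts_alt (pvDiffWitness_detect_build_bursts.1) (pvDiffWitness_detect_build_bursts.2.1) (pvDiffWitness_detect_build_bursts.2.2.1) (pvDiffWitness_detect_build_bursts.2.2.2) = pvDiffWitnessOut_detect_build_bursts.2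 ∧ pvDiffWitnessOut_detect_build_bursts.1 ≠ pvDiffWitnessOut_detect_build_bursts.2
def Claim_exact_detect_build_bursts : Prop := ∀ (_builds : List (List (String × String))) (gap_size : Int) (burst_size : Int) (states : List String), Dom_detect_build_bursts _builds gap_size burst_size states → Pre_detect_build_bursts _builds gap_size burst_size states → D_detect_build_bursts _builds gap_size burst_size states → detect_build_bursts _builds gap_size burst_size states ≠ detect_build_bursts_alt _builds gap_size burst_size states

-- ===== LEMMAS AND PROOFS =====

-- A's loop body without the index bookkeeping and without the end-of-loop finalisation
def pvStepA (gap_size burst_size : Int)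
    (s : Int × Int × Int × List Int) (k : Bool) : Int × Int × Int × List Int :=
  if k = false then
    let neg := s.2.1 + 1
    if neg = gap_size then
      if s.1 ≥ burst_size then (0, 0, s.2.2.1 + 1, s.2.2.2 ++ [s.1])
      else (0, 0, s.2.2.1, s.2.2.2)
    else (s.1, neg, s.2.2.1, s.2.2.2)
  else (s.1 + 1, 0, s.2.2.1, s.2.2.2)

def pvRunA (gap_size burst_size : Int) (s : Int × Int × Int × List Int) (ks : List Bool) :
    Int × Int × Int × List Int :=
  ks.foldl (pvStepA gap_size burst_size) s

-- trailing finalisation (A runs it while processing the last build when it is in-state)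
def pvTrail (burst_size : Int) (k : Bool) (s : Int × Int × Int × List Int) : Int × Int × Int × List Int :=
  if k then (if s.1 ≥ burst_size then (s.1, s.2.1, s.2.2.1 + 1, s.2.2.2 ++ [s.1]) else s) else s

def pvExpand (rs : List (Bool × Int)) : List Bool :=
  rs.flatMap (fun r => List.replicate r.2.toNat r.1)

lemma pvGetLastD_irrel {α : Type} (l : List α) (h : l ≠ []) (d1 d2 : α) :
    l.getLastD d1 = l.getLastD d2 := by
  cases l with
  | nil => exact absurd rfl h
  | cons a l => rw [List.getLastD_cons, List.getLastD_cons]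

lemma pvGetLastD_append {α : Type} (xs ys : List α) (d : α) (h : ys ≠ []) :
    (xs ++ ys).getLastD d = ys.getLastD d := by
  rw [List.getLastD_eq_getLast?, List.getLastD_eq_getLast?, List.getLast?_append_of_ne_nil xs h]

lemma pvFoldFull (g b n : Int) (ks : List Bool) :
    ∀ (pos neg nb : Int) (sz : List Int) (i : Int), i + ks.length = n →
    ks.foldl (pvStepFull g b n) (pos, neg, nb, sz, i) =
      ((pvTrail b (ks.getLastD false) (pvRunA g b (pos, neg, nb, sz) ks)).1,
       (pvTrail b (ks.getLastD false) (pvRunA g b (pos, neg, nb, sz) ks)).2.1,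
       (pvTrail b (ks.getLastD false) (pvRunA g b (pos, neg, nb, sz) ks)).2.2.1,
       (pvTrail b (ks.getLastD false) (pvRunA g b (pos, neg, nb, sz) ks)).2.2.2, n) := by
  induction ks with
  | nil =>
    intro pos neg nb sz i h
    have h' : i = n := by simpa using h
    subst h'
    simp [pvTrail, pvRunA]
  | cons k ks ih =>
    intro pos neg nb sz i h
    simp only [List.length_cons] at h
    simp only [List.foldl_cons]
    cases ks with
    | nil =>
      have hin : i + 1 = n := by norm_num at h; omega
      simp only [List.foldl_nil]
      cases k
      · have hstep : pvStepFull g b n (pos, neg, nb, sz, i) false =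
          ((pvStepA g b (pos, neg, nb, sz) false).1, (pvStepA g b (pos, neg, nb, sz) false).2.1,
           (pvStepA g b (pos, neg, nb, sz) false).2.2.1, (pvStepA g b (pos, neg, nb, sz) false).2.2.2, i + 1) := by
          simp only [pvStepFull, pvStepA]
          split_ifs <;> first | contradiction | simp
        rw [hstep, hin]
        simp [pvTrail, pvRunA]
      · have hstep : pvStepFull g b n (pos, neg, nb, sz, i) true =
          ((pvTrail b true (pvStepA g b (pos, neg, nb, sz) true)).1,
           (pvTrail b true (pvStepA g b (pos, neg, nb, sz) true)).2.1,
           (pvTrail b true (pvStepA g b (pos, neg, nb, sz) true)).2.2.1,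
           (pvTrail b true (pvStepA g b (pos, neg, nb, sz) true)).2.2.2, i + 1) := by
          simp only [pvStepFull, pvStepA, pvTrail, hin]
          norm_num
        rw [hstep, hin]
        simp [pvRunA]
    | cons k2 ks2 =>
      have hne : ¬ (i + 1 = n) := by
        simp only [List.length_cons] at h
        push_cast at h
        have : (0:Int) ≤ ((k2 :: ks2).length : Int) := by positivity
        simp only [List.length_cons] at this ⊢
        push_cast at this
        omega
      have hstep : pvStepFull g b n (pos, neg, nb, sz, i) k =
        ((pvStepA g b (pos, neg, nb, sz) k).1, (pvStepA g b (pos, neg, nb, sz) k).2.1,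
         (pvStepA g b (pos, neg, nb, sz) k).2.2.1, (pvStepA g b (pos, neg, nb, sz) k).2.2.2, i + 1) := by
        cases k
        · simp only [pvStepFull, pvStepA]
          split_ifs <;> simp_all
        · simp only [pvStepFull, pvStepA, hne]
          norm_num [hne]
      rw [hstep]
      rcases hA : pvStepA g b (pos, neg, nb, sz) k with ⟨p1, p2, p3, p4⟩
      rw [ih p1 p2 p3 p4 (i + 1) (by simp only [List.length_cons] at h ⊢; push_cast at h ⊢; omega)]
      have hrun : pvRunA g b (pos, neg, nb, sz) (k :: k2 :: ks2)
          = pvRunA g b (p1, p2, p3, p4) (k2 :: ks2) := by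
        simp only [pvRunA, List.foldl_cons, hA]
      rw [hrun]
      have hlast : (k :: k2 :: ks2).getLastD false = (k2 :: ks2).getLastD false := by
        rw [List.getLastD_cons]
        exact pvGetLastD_irrel _ (by simp) k false
      rw [hlast]

lemma pvRunA_true (g b : Int) : ∀ (L : Nat) (pos neg nb : Int) (sz : List Int),
    pvRunA g b (pos, neg, nb, sz) (List.replicate L true) =
      (pos + L, if L = 0 then neg else 0, nb, sz) := by
  intro L
  induction L with
  | zero => intro pos neg nb sz; simp [pvRunA]
  | succ L ih =>
    intro pos neg nb sz
    simp only [List.replicate_succ, pvRunA, List.foldl_cons]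
    have hstep : pvStepA g b (pos, neg, nb, sz) true = (pos + 1, 0, nb, sz) := by
      simp [pvStepA]
    rw [hstep]
    show pvRunA g b (pos + 1, 0, nb, sz) (List.replicate L true) = _
    rw [ih]
    have h1 : pos + 1 + (L : Int) = pos + ((L + 1 : Nat) : Int) := by push_cast; ring
    rw [h1]
    cases L <;> simp

lemma pvRunA_false_nonpos (g b : Int) (hg : g ≤ 0) :
    ∀ (L : Nat) (pos neg nb : Int) (sz : List Int), 0 ≤ neg →
    pvRunA g b (pos, neg, nb, sz) (List.replicate L false) = (pos, neg + L, nb, sz) := by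
  intro L
  induction L with
  | zero => intro pos neg nb sz _; simp [pvRunA]
  | succ L ih =>
    intro pos neg nb sz hneg
    simp only [List.replicate_succ, pvRunA, List.foldl_cons]
    have hne : ¬ (neg + 1 = g) := by omega
    have hstep : pvStepA g b (pos, neg, nb, sz) false = (pos, neg + 1, nb, sz) := by
      simp [pvStepA, hne]
    rw [hstep]
    show pvRunA g b (pos, neg + 1, nb, sz) (List.replicate L false) = _
    rw [ih _ _ _ _ (by omega)]
    have h1 : neg + 1 + (L : Int) = neg + ((L + 1 : Nat) : Int) := by push_cast; ring
    rw [h1]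

lemma pvRunA_cons (g b : Int) (s : Int × Int × Int × List Int) (k : Bool) (ks : List Bool) :
    pvRunA g b s (k :: ks) = pvRunA g b (pvStepA g b s k) ks := rfl

lemma pvRunA_false_pos (g b : Int) (hg : 1 ≤ g) :
    ∀ (L neg : Nat) (pos nb : Int) (sz : List Int), neg < g.toNat →
    pvRunA g b (pos, (neg : Int), nb, sz) (List.replicate L false) =
      (if (neg + L) / g.toNat = 0 then
        (pos, ((neg + L : Nat) : Int), nb, sz)
      else
        ((0:Int), (((neg + L) % g.toNat : Nat) : Int),
         nb + (if pos ≥ b then 1 else 0) + (if (0:Int) ≥ b then ((neg + L) / g.toNat - 1 : Nat) else 0),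
         (sz ++ (if pos ≥ b then [pos] else [])) ++
           (if (0:Int) ≥ b then List.replicate ((neg + L) / g.toNat - 1) (0:Int) else []))) := by
  have hg0 : 0 < g.toNat := by omega
  have hgn : (g.toNat : Int) = g := Int.toNat_of_nonneg (by omega)
  intro L
  induction L with
  | zero =>
    intro neg pos nb sz hneg
    have h0 : (neg + 0) / g.toNat = 0 := Nat.div_eq_of_lt (by omega)
    rw [if_pos h0]
    simp [pvRunA]
  | succ L ih =>
    intro neg pos nb sz hneg
    rw [List.replicate_succ, pvRunA_cons]
    by_cases hEq : neg + 1 = g.toNat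
    · have hEqI : (neg : Int) + 1 = g := by rw [← hgn]; exact_mod_cast hEq
      have he : (neg + (L + 1)) / g.toNat = L / g.toNat + 1 := by
        have hx : neg + (L + 1) = g.toNat + L := by omega
        rw [hx, Nat.add_div_left _ hg0]
      have hm : (neg + (L + 1)) % g.toNat = L % g.toNat := by
        have hx : neg + (L + 1) = g.toNat + L := by omega
        rw [hx, Nat.add_mod_left]
      have hstep : pvStepA g b (pos, (neg : Int), nb, sz) false =
          (0, 0, nb + (if pos ≥ b then 1 else 0), sz ++ (if pos ≥ b then [pos] else [])) := by
        by_cases hp : pos ≥ b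
        · simp [pvStepA, hEqI, hp]
        · simp [pvStepA, hEqI, hp]
      rw [hstep]
      have hfin : pvRunA g b (0, (0:Int), nb + (if pos ≥ b then 1 else 0),
            sz ++ (if pos ≥ b then [pos] else [])) (List.replicate L false) =
          if L / g.toNat = 0 then
            ((0:Int), (L : Int), nb + (if pos ≥ b then 1 else 0), sz ++ (if pos ≥ b then [pos] else []))
          else ((0:Int), ((L % g.toNat : Nat) : Int),
            nb + (if pos ≥ b then 1 else 0) + (if (0:Int) ≥ b then 1 else 0) + (if (0:Int) ≥ b then ((L / g.toNat - 1 : Nat) : Int) else 0),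
            ((sz ++ (if pos ≥ b then [pos] else [])) ++ (if (0:Int) ≥ b then [(0:Int)] else [])) ++
              (if (0:Int) ≥ b then List.replicate (L / g.toNat - 1) (0:Int) else [])) := by
        have H := ih 0 0 (nb + (if pos ≥ b then 1 else 0)) (sz ++ (if pos ≥ b then [pos] else [])) (by omega)
        simp only [Nat.zero_add, Nat.cast_zero] at H
        rw [H]
        by_cases hL : L / g.toNat = 0
        · rw [if_pos hL, if_pos hL]
        · rw [if_neg hL, if_neg hL]
          by_cases h0b : (0:Int) ≥ b <;> simp [h0b]
      rw [hfin, he, hm]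
      rw [if_neg (Nat.succ_ne_zero _)]
      by_cases hL : L / g.toNat = 0
      · rw [if_pos hL]
        have hLlt : L < g.toNat := Nat.lt_of_div_eq_zero hg0 hL
        have hmod : L % g.toNat = L := Nat.mod_eq_of_lt hLlt
        rw [hmod, hL]
        refine Prod.ext rfl (Prod.ext rfl (Prod.ext ?_ ?_)) <;> simp
      · rw [if_neg hL]
        have h1 : L / g.toNat + 1 - 1 = L / g.toNat := by
          generalize L / g.toNat = m
          omega
        rw [h1]
        refine Prod.ext rfl (Prod.ext rfl (Prod.ext ?_ ?_))
        · simp only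
          by_cases h0b : (0:Int) ≥ b
          · simp only [if_pos h0b]
            have hc : ((L / g.toNat - 1 : Nat) : Int) = ((L / g.toNat : Nat) : Int) - 1 := by
              have := Nat.one_le_iff_ne_zero.mpr hL
              omega
            rw [hc]; ring
          · simp [h0b]
        · simp only
          by_cases h0b : (0:Int) ≥ b
          · simp only [if_pos h0b]
            have h2 : L / g.toNat = (L / g.toNat - 1) + 1 := by omega
            rw [h2, List.replicate_succ]
            simp [List.append_assoc]
          · simp [h0b]
    · have hne : ¬ ((neg : Int) + 1 = g) := by
        rw [← hgn]
        intro hcon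
        exact hEq (by exact_mod_cast hcon)
      have hstep : pvStepA g b (pos, (neg : Int), nb, sz) false = (pos, ((neg + 1 : Nat) : Int), nb, sz) := by
        simp only [pvStepA]
        split_ifs <;> first | (exfalso; omega) | (refine Prod.ext rfl (Prod.ext ?_ rfl); push_cast; ring) | simp_all
      rw [hstep]
      have H := ih (neg + 1) pos nb sz (by omega)
      have hT : neg + 1 + L = neg + (L + 1) := by omega
      rw [hT] at H
      rw [H]

lemma pvStepB_lastIn (g b : Int) (s : Int × Int × List Int × Bool) (run : Bool × Int) :
    (pvStepB g b s run).2.2.2 = run.1 := by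
  unfold pvStepB
  rcases run with ⟨k, c⟩
  by_cases hk : k <;> simp [hk] <;> split_ifs <;> simp

lemma pvFoldB_lastIn (g b : Int) : ∀ (runs : List (Bool × Int)) (s : Int × Int × List Int × Bool),
    (runs.foldl (pvStepB g b) s).2.2.2 = (runs.map Prod.fst).getLastD s.2.2.2 := by
  intro runs
  induction runs with
  | nil => intro s; simp
  | cons r rs ih =>
    intro s
    simp only [List.foldl_cons, List.map_cons]
    rw [ih, pvStepB_lastIn, List.getLastD_cons]

lemma pvExpand_getLastD : ∀ (rs : List (Bool × Int)), (∀ r ∈ rs, 1 ≤ r.2) → ∀ (d : Bool),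
    (pvExpand rs).getLastD d = (rs.map Prod.fst).getLastD d := by
  intro rs
  induction rs with
  | nil => intro _ d; simp [pvExpand]
  | cons r rs ih =>
    intro h d
    have hr : 1 ≤ r.2 := h r (by simp)
    have hrest : ∀ x ∈ rs, 1 ≤ x.2 := fun x hx => h x (by simp [hx])
    simp only [pvExpand, List.flatMap_cons, List.map_cons]
    cases hrs : rs with
    | nil =>
      simp only [List.flatMap_nil, List.append_nil, List.map_nil]
      have : r.2.toNat ≠ 0 := by omega
      cases hL : r.2.toNat with
      | zero => omega
      | succ m => simp [List.replicate_succ', List.getLastD_concat]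
    | cons r2 rs2 =>
      have hne : pvExpand rs ≠ [] := by
        subst hrs
        have h2 : 1 ≤ r2.2 := hrest r2 (by simp)
        simp only [pvExpand, List.flatMap_cons]
        intro hc
        rcases List.append_eq_nil_iff.mp hc with ⟨h1, _⟩
        have : r2.2.toNat ≠ 0 := by omega
        simp [List.replicate_eq_nil_iff] at h1
        omega
      rw [← hrs]
      have hEx : List.flatMap (fun r => List.replicate r.2.toNat r.1) rs = pvExpand rs := rfl
      rw [hEx, pvGetLastD_append _ _ _ hne, ih hrest]
      have hk : (List.map Prod.fst rs) ≠ [] := by subst hrs; simp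
      rw [List.getLastD_cons]
      exact pvGetLastD_irrel _ hk d r.1

-- a run's block is an infix of the expansion
lemma pvRun_infix (rs : List (Bool × Int)) (r : Bool × Int) (hr : r ∈ rs) :
    List.replicate r.2.toNat r.1 <:+: pvExpand rs := by
  obtain ⟨s, t, hst⟩ := List.append_of_mem hr
  subst hst
  exact ⟨pvExpand s, pvExpand t, by simp [pvExpand, List.flatMap_append]⟩

-- the main correspondence between A's flat walk and B's walk over the runs;
-- Hb rules out A's extra zero-burst events (exactly the inputs D_ covers)
lemma pvMainRuns (g b : Int) : ∀ (runs : List (Bool × Int)) (pos neg nb : Int) (sz : List Int) (lk : Bool),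
    (1 ≤ b ∨ (1 ≤ g → ∀ r ∈ runs, r.1 = false → r.2 < 2 * g)) →
    (∀ r ∈ runs, 1 ≤ r.2) → runs.IsChain (fun a c => a.1 ≠ c.1) →
    0 ≤ neg → (1 ≤ g → neg < g) →
    (∀ r, runs.head? = some r → r.1 = false → neg = 0) →
    ∃ negf : Int, 0 ≤ negf ∧ (1 ≤ g → negf < g) ∧
      pvRunA g b (pos, neg, nb, sz) (pvExpand runs) =
        ((runs.foldl (pvStepB g b) (pos, nb, sz, lk)).1, negf,
         (runs.foldl (pvStepB g b) (pos, nb, sz, lk)).2.1,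
         (runs.foldl (pvStepB g b) (pos, nb, sz, lk)).2.2.1) := by
  intro runs
  induction runs with
  | nil =>
    intro pos neg nb sz lk _ _ _ hneg hnegg _
    exact ⟨neg, hneg, hnegg, by simp [pvExpand, pvRunA]⟩
  | cons r rs ih =>
    intro pos neg nb sz lk Hb hcnt hch hneg hnegg hhead
    rcases r with ⟨k, c⟩
    have hc1 : 1 ≤ c := hcnt (k, c) (by simp)
    have hcL : ((c.toNat : Nat) : Int) = c := Int.toNat_of_nonneg (by omega)
    have hcnt' : ∀ x ∈ rs, 1 ≤ x.2 := fun x hx => hcnt x (by simp [hx])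
    have Hb' : 1 ≤ b ∨ (1 ≤ g → ∀ x ∈ rs, x.1 = false → x.2 < 2 * g) := by
      rcases Hb with h | h
      · exact Or.inl h
      · exact Or.inr (fun hg x hx => h hg x (by simp [hx]))
    have hch' : rs.IsChain (fun a c => a.1 ≠ c.1) := by
      cases rs with
      | nil => simp
      | cons r2 rs2 => exact (List.isChain_cons_cons.mp hch).2
    have hnothead : ∀ r2, rs.head? = some r2 → ¬ (r2.1 = k) := by
      cases rs with
      | nil => intro r2 h2; simp at h2
      | cons r2 rs2 =>
        intro x hx
        simp only [List.head?_cons, Option.some.injEq] at hx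
        subst hx
        have := (List.isChain_cons_cons.mp hch).1
        exact fun hf => this (by rw [hf])
    have hexp : pvExpand ((k, c) :: rs) = List.replicate c.toNat k ++ pvExpand rs := by
      simp [pvExpand]
    have hsplit : ∀ s : Int × Int × Int × List Int,
        pvRunA g b s (List.replicate c.toNat k ++ pvExpand rs)
        = pvRunA g b (pvRunA g b s (List.replicate c.toNat k)) (pvExpand rs) := by
      intro s; simp [pvRunA, List.foldl_append]
    rw [hexp, hsplit]
    simp only [List.foldl_cons]
    cases k
    · -- out-of-state run
      have hneg0 : neg = 0 := hhead (false, c) rfl rfl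
      subst hneg0
      by_cases hg : 1 ≤ g
      · have hgn0 : (0:Nat) < g.toNat := by omega
        have hgnat : ((g.toNat : Nat) : Int) = g := Int.toNat_of_nonneg (by omega)
        have H := pvRunA_false_pos g b hg c.toNat 0 pos nb sz (by omega)
        simp only [Nat.cast_zero, Nat.zero_add] at H
        rw [H]
        by_cases hL : c.toNat / g.toNat = 0
        · -- run shorter than the gap: both sides leave the burst open
          have hclt : c < g := by
            have := Nat.lt_of_div_eq_zero hgn0 hL
            omega
          have hstep : pvStepB g b (pos, nb, sz, lk) (false, c) = (pos, nb, sz, false) := by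
            simp only [pvStepB]
            rw [if_neg (by simp), if_neg (by rintro ⟨_, h2⟩; omega)]
          rw [if_pos hL, hstep]
          refine ih pos ((c.toNat : Nat) : Int) nb sz false Hb' hcnt' hch' (by positivity)
            (fun _ => by
              have : c.toNat < g.toNat := Nat.lt_of_div_eq_zero hgn0 hL
              omega)
            (fun r2 h2 hf => absurd hf (hnothead r2 h2))
        · -- run at least one gap long: B closes the burst once; outside D_ A does the same
          have hgc : g ≤ c := by
            have h1 : 1 ≤ c.toNat / g.toNat := Nat.one_le_iff_ne_zero.mpr hL
            have := Nat.div_le_div_right (c := g.toNat) (Nat.le_of_lt_succ (Nat.lt_succ_of_le (le_refl c.toNat)))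
            have h2 : g.toNat ≤ c.toNat := by
              by_contra hcon
              exact hL (Nat.div_eq_of_lt (by omega))
            omega
          have hev1 : ((if (0:Int) ≥ b then (c.toNat / g.toNat - 1 : Nat) else 0 : Nat) : Int) = 0 ∧
              (if (0:Int) ≥ b then List.replicate (c.toNat / g.toNat - 1) (0:Int) else []) = ([] : List Int) := by
            rcases Hb with hb1 | hb2
            · have : ¬ ((0:Int) ≥ b) := by omega
              simp [this]
            · have hcb : c < 2 * g := hb2 hg (false, c) (by simp) rfl
              have hdiv : c.toNat / g.toNat = 1 := by
                have h2 : c.toNat / g.toNat < 2 := (Nat.div_lt_iff_lt_mul hgn0).mpr (by omega)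
                have h1 : 1 ≤ c.toNat / g.toNat := Nat.one_le_iff_ne_zero.mpr hL
                omega
              rw [hdiv]
              norm_num
          rw [if_neg hL]
          have hstep : pvStepB g b (pos, nb, sz, lk) (false, c) =
              ((0:Int), nb + (if pos ≥ b then 1 else 0), sz ++ (if pos ≥ b then [pos] else []), false) := by
            simp only [pvStepB]
            rw [if_neg (by simp), if_pos ⟨hg, hgc⟩]
            by_cases hp : pos ≥ b <;> simp [hp]
          rw [hstep]
          have hres :
              ((0:Int), (((c.toNat) % g.toNat : Nat) : Int),
               nb + (if pos ≥ b then 1 else 0) + ((if (0:Int) ≥ b then (c.toNat / g.toNat - 1 : Nat) else 0 : Nat) : Int),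
               (sz ++ (if pos ≥ b then [pos] else [])) ++
                 (if (0:Int) ≥ b then List.replicate (c.toNat / g.toNat - 1) (0:Int) else []))
              = ((0:Int), (((c.toNat) % g.toNat : Nat) : Int),
                 nb + (if pos ≥ b then 1 else 0), sz ++ (if pos ≥ b then [pos] else [])) := by
            rw [hev1.1, hev1.2]
            simp
          rw [hres]
          refine ih 0 (((c.toNat % g.toNat : Nat) : Int))
            (nb + (if pos ≥ b then 1 else 0)) (sz ++ (if pos ≥ b then [pos] else []))
            false Hb' hcnt' hch' (by positivity)
            (fun _ => by
              have : c.toNat % g.toNat < g.toNat := Nat.mod_lt _ hgn0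
              omega)
            (fun r2 h2 hf => absurd hf (hnothead r2 h2))
      · have H := pvRunA_false_nonpos g b (by omega) c.toNat pos 0 nb sz le_rfl
        simp only [zero_add] at H
        rw [H]
        have hstep : pvStepB g b (pos, nb, sz, lk) (false, c) = (pos, nb, sz, false) := by
          simp only [pvStepB]
          rw [if_neg (by simp), if_neg (by rintro ⟨h1, _⟩; exact hg h1)]
        rw [hstep]
        refine ih pos ((c.toNat : Nat) : Int) nb sz false Hb' hcnt' hch' (by positivity)
          (fun hg1 => absurd hg1 hg)
          (fun r2 h2 hf => absurd hf (hnothead r2 h2))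
    · -- in-state run
      rw [pvRunA_true g b c.toNat pos neg nb sz]
      rw [if_neg (by omega : ¬ (c.toNat = 0))]
      have hstep : pvStepB g b (pos, nb, sz, lk) (true, c) = (pos + c, nb, sz, true) := by
        simp [pvStepB]
      rw [hstep, hcL]
      exact ih (pos + c) 0 nb sz true Hb' hcnt' hch' le_rfl (fun _ => by omega)
        (fun _ _ _ => rfl)

lemma pvRle (ks : List Bool) : ∀ (acc : List (Bool × Int)),
    (∀ r ∈ acc, 1 ≤ r.2) → acc.IsChain (fun a c => a.1 ≠ c.1) →
    (∀ r ∈ ks.foldl pvRleStep acc, 1 ≤ r.2) ∧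
    (ks.foldl pvRleStep acc).IsChain (fun a c => a.1 ≠ c.1) ∧
    pvExpand (ks.foldl pvRleStep acc).reverse = pvExpand acc.reverse ++ ks := by
  induction ks with
  | nil => intro acc h1 h2; exact ⟨h1, h2, by simp⟩
  | cons k ks ih =>
    intro acc h1 h2
    simp only [List.foldl_cons]
    cases acc with
    | nil =>
      have hstep : pvRleStep [] k = [(k, 1)] := rfl
      rw [hstep]
      have := ih [(k, 1)] (by intro r hr; simp at hr; subst hr; norm_num)
        (List.isChain_singleton _)
      refine ⟨this.1, this.2.1, ?_⟩
      rw [this.2.2]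
      simp [pvExpand]
    | cons hd rest =>
      rcases hd with ⟨k', c⟩
      have hc : 1 ≤ c := h1 (k', c) (by simp)
      by_cases hk : k' == k
      · have hkk : k' = k := by simpa using hk
        have step : pvRleStep ((k', c) :: rest) k = (k', c + 1) :: rest := by
          simp [pvRleStep, hk]
        rw [step]
        have h1' : ∀ r ∈ (k', c + 1) :: rest, 1 ≤ r.2 := by
          intro r hr
          rcases List.mem_cons.mp hr with h | h
          · subst h; simp; omega
          · exact h1 r (by simp [h])
        have h2' : ((k', c + 1) :: rest).IsChain (fun a c => a.1 ≠ c.1) := by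
          cases rest with
          | nil => exact List.isChain_singleton _
          | cons r2 rs2 =>
            rw [List.isChain_cons_cons] at h2 ⊢
            exact ⟨h2.1, h2.2⟩
        have := ih _ h1' h2'
        refine ⟨this.1, this.2.1, ?_⟩
        rw [this.2.2]
        have hrep : pvExpand (((k', c + 1) :: rest).reverse) = pvExpand (((k', c) :: rest).reverse) ++ [k] := by
          simp only [List.reverse_cons, pvExpand, List.flatMap_append, List.flatMap_cons,
            List.flatMap_nil, List.append_nil]
          have : (c + 1).toNat = c.toNat + 1 := by omega
          rw [this, List.replicate_succ', hkk]
          simp [List.append_assoc]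
        rw [hrep, List.append_assoc]
        rfl
      · have step : pvRleStep ((k', c) :: rest) k = (k, 1) :: (k', c) :: rest := by
          simp [pvRleStep, hk]
        rw [step]
        have h1' : ∀ r ∈ (k, 1) :: (k', c) :: rest, 1 ≤ r.2 := by
          intro r hr
          rcases List.mem_cons.mp hr with h | h
          · subst h; norm_num
          · exact h1 r h
        have h2' : ((k, 1) :: (k', c) :: rest).IsChain (fun a c => a.1 ≠ c.1) := by
          rw [List.isChain_cons_cons]
          refine ⟨?_, h2⟩
          simp at hk
          exact fun he => hk he.symm
        have := ih _ h1' h2'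
        refine ⟨this.1, this.2.1, ?_⟩
        rw [this.2.2]
        have hrep : pvExpand (((k, 1) :: (k', c) :: rest).reverse) = pvExpand (((k', c) :: rest).reverse) ++ [k] := by
          simp [pvExpand, List.flatMap_append]
        rw [hrep, List.append_assoc]
        rfl

lemma pvFoldl_inb {β : Type} (F : β → Bool → β) (states : List String)
    (rows : List (List (String × String))) (init : β) :
    rows.foldl (fun s row => F s (pvInb states row)) init = (rows.map (pvInb states)).foldl F init :=
  List.foldl_map.symm

-- an all-false window of length k in the expansion lies inside one false run
lemma pvRep_infix_run : ∀ (rs : List (Bool × Int)) (k : Nat), 0 < k →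
    (∀ r ∈ rs, 1 ≤ r.2) → rs.IsChain (fun a c => a.1 ≠ c.1) →
    List.replicate k false <:+: pvExpand rs →
    ∃ r ∈ rs, r.1 = false ∧ k ≤ r.2.toNat := by
  intro rs
  induction rs with
  | nil =>
    intro k hk _ _ hinf
    have h0 : List.replicate k false = ([] : List Bool) := by
      simpa [pvExpand] using List.eq_nil_of_infix_nil hinf
    have := congrArg List.length h0
    simp at this
    omega
  | cons r rest ih =>
    intro k hk hcnt hch hinf
    rcases r with ⟨k0, c⟩
    have hc1 : 1 ≤ c := hcnt (k0, c) (by simp)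
    have hcnt' : ∀ x ∈ rest, 1 ≤ x.2 := fun x hx => hcnt x (by simp [hx])
    have hch' : rest.IsChain (fun a c => a.1 ≠ c.1) := by
      cases rest with
      | nil => simp
      | cons r2 rs2 => exact (List.isChain_cons_cons.mp hch).2
    have hexp : pvExpand ((k0, c) :: rest) = List.replicate c.toNat k0 ++ pvExpand rest := by
      simp [pvExpand]
    rw [hexp] at hinf
    obtain ⟨sL, tL, hst⟩ := hinf
    by_cases hs : c.toNat ≤ sL.length
    · -- the window lies wholly past this run: recurse
      have hrec : List.replicate k false <:+: pvExpand rest := by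
        refine ⟨sL.drop c.toNat, tL, ?_⟩
        have := congrArg (List.drop c.toNat) hst
        rw [List.append_assoc, List.drop_append_of_le_length hs] at this
        rw [show (List.replicate c.toNat k0 ++ pvExpand rest).drop c.toNat = pvExpand rest by
          simpa using List.drop_left (List.replicate c.toNat k0) (pvExpand rest)] at this
        rw [List.append_assoc]
        exact this
      obtain ⟨r, hr, h1, h2⟩ := ih k hk hcnt' hch' hrec
      exact ⟨r, by simp [hr], h1, h2⟩
    · push_neg at hs
      cases k0
      · -- the current run is out-of-state
        by_cases hkc : k ≤ c.toNat
        · exact ⟨(false, c), by simp, rfl, hkc⟩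
        · -- the window would span past the run into an in-state run: contradiction
          exfalso
          push_neg at hkc
          have hL := congrArg (fun l => l[c.toNat]?) hst
          simp only [List.append_assoc] at hL
          rw [List.getElem?_append_right (by omega : sL.length ≤ c.toNat),
            List.getElem?_append_left (by simp; omega)] at hL
          simp only [List.getElem?_replicate, if_pos (by omega : c.toNat - sL.length < k)] at hL
          rw [List.getElem?_append_right (by simp : (List.replicate c.toNat false).length ≤ c.toNat)] at hL
          simp only [List.length_replicate, Nat.sub_self] at hL
          cases hrest : rest with
          | nil => rw [hrest] at hL; simp [pvExpand] at hL
          | cons r2 rs2 =>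
            rcases r2 with ⟨k1, c1⟩
            have hk1 : k1 = true := by
              rw [hrest] at hch
              have := (List.isChain_cons_cons.mp hch).1
              simpa using (by intro hf; exact this (by simp [hf]) : ¬ k1 = false)
            have hc2 : 1 ≤ c1 := hcnt (k1, c1) (by simp [hrest])
            rw [hrest, hk1] at hL
            simp only [pvExpand, List.flatMap_cons] at hL
            rw [List.getElem?_append_left (by simp; omega)] at hL
            simp only [List.getElem?_replicate, if_pos (by omega : (0:Nat) < c1.toNat)] at hL
            exact Bool.false_ne_true (Option.some.injEq _ _ ▸ hL)
      · -- the current run is in-state: the window's first element would be true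
        exfalso
        have hL := congrArg (fun l => l[sL.length]?) hst
        simp only [List.append_assoc] at hL
        rw [List.getElem?_append_right (le_refl sL.length),
          List.getElem?_append_left (by simp; omega)] at hL
        simp only [Nat.sub_self, List.getElem?_replicate, if_pos hk] at hL
        rw [List.getElem?_append_left (by simp; omega)] at hL
        simp only [List.getElem?_replicate, if_pos (by omega : sL.length < c.toNat)] at hL
        exact Bool.false_ne_true (Option.some.injEq _ _ ▸ hL)

-- with burst_size ≤ 0 and gap_size ≥ 1, A's burst count exceeds B's by one per extra gap
-- event, and a run of length ≥ 2*gap_size forces at least one extra event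
lemma pvMainRunsD (g b : Int) (hg : 1 ≤ g) (hb : b ≤ 0) :
    ∀ (runs : List (Bool × Int)) (pos neg nbA nbB : Int) (szA szB : List Int) (lk : Bool),
    (∀ r ∈ runs, 1 ≤ r.2) → runs.IsChain (fun a c => a.1 ≠ c.1) →
    0 ≤ pos → 0 ≤ neg → neg < g →
    (∀ r, runs.head? = some r → r.1 = false → neg = 0) →
    ∃ E : Int, 0 ≤ E ∧
      ((∃ r ∈ runs, r.1 = false ∧ 2 * g ≤ r.2) → 1 ≤ E) ∧
      (pvRunA g b (pos, neg, nbA, szA) (pvExpand runs)).1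
        = (runs.foldl (pvStepB g b) (pos, nbB, szB, lk)).1 ∧
      (pvRunA g b (pos, neg, nbA, szA) (pvExpand runs)).2.2.1 + nbB
        = (runs.foldl (pvStepB g b) (pos, nbB, szB, lk)).2.1 + nbA + E := by
  have hg0 : (0:Nat) < g.toNat := by omega
  intro runs
  induction runs with
  | nil =>
    intro pos neg nbA nbB szA szB lk _ _ _ _ _ _
    exact ⟨0, le_rfl, by rintro ⟨r, hr, _⟩; simp at hr,
      by simp [pvExpand, pvRunA], by simp [pvExpand, pvRunA]; ring⟩
  | cons r rs ih =>
    intro pos neg nbA nbB szA szB lk hcnt hch hpos hneg hnegg hhead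
    rcases r with ⟨k, c⟩
    have hc1 : 1 ≤ c := hcnt (k, c) (by simp)
    have hcL : ((c.toNat : Nat) : Int) = c := Int.toNat_of_nonneg (by omega)
    have hcnt' : ∀ x ∈ rs, 1 ≤ x.2 := fun x hx => hcnt x (by simp [hx])
    have hch' : rs.IsChain (fun a c => a.1 ≠ c.1) := by
      cases rs with
      | nil => simp
      | cons r2 rs2 => exact (List.isChain_cons_cons.mp hch).2
    have hnothead : ∀ r2, rs.head? = some r2 → ¬ (r2.1 = k) := by
      cases rs with
      | nil => intro r2 h2; simp at h2
      | cons r2 rs2 =>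
        intro x hx
        simp only [List.head?_cons, Option.some.injEq] at hx
        subst hx
        have := (List.isChain_cons_cons.mp hch).1
        exact fun hf => this (by rw [hf])
    have hexp : pvExpand ((k, c) :: rs) = List.replicate c.toNat k ++ pvExpand rs := by
      simp [pvExpand]
    have hsplit : ∀ s : Int × Int × Int × List Int,
        pvRunA g b s (List.replicate c.toNat k ++ pvExpand rs)
        = pvRunA g b (pvRunA g b s (List.replicate c.toNat k)) (pvExpand rs) := by
      intro s; simp [pvRunA, List.foldl_append]
    rw [hexp, hsplit]
    simp only [List.foldl_cons]
    cases k
    · -- out-of-state run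
      have hneg0 : neg = 0 := hhead (false, c) rfl rfl
      subst hneg0
      have H := pvRunA_false_pos g b hg c.toNat 0 pos nbA szA (by omega)
      simp only [Nat.cast_zero, Nat.zero_add] at H
      rw [H]
      by_cases hL : c.toNat / g.toNat = 0
      · have hclt : c < g := by
          have := Nat.lt_of_div_eq_zero hg0 hL
          omega
        have hstep : pvStepB g b (pos, nbB, szB, lk) (false, c) = (pos, nbB, szB, false) := by
          simp only [pvStepB]
          rw [if_neg (by simp), if_neg (by rintro ⟨_, h2⟩; omega)]
        rw [if_pos hL, hstep]
        obtain ⟨E, hE0, hE1, hEa, hEb⟩ := ih pos ((c.toNat : Nat) : Int) nbA nbB szA szB false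
          hcnt' hch' hpos (by positivity) (by omega)
          (fun r2 h2 hf => absurd hf (hnothead r2 h2))
        refine ⟨E, hE0, ?_, hEa, hEb⟩
        rintro ⟨r, hr, hrf, hrb⟩
        rcases List.mem_cons.mp hr with h | h
        · exfalso; rw [h] at hrb; omega
        · exact hE1 ⟨r, h, hrf, hrb⟩
      · have hpb : pos ≥ b := by omega
        have h0b : (0:Int) ≥ b := by omega
        have e1 : 1 ≤ c.toNat / g.toNat := Nat.one_le_iff_ne_zero.mpr hL
        rw [if_neg hL]
        simp only [if_pos hpb, if_pos h0b]
        have hgc : g ≤ c := by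
          have h2 : g.toNat ≤ c.toNat := by
            by_contra hcon
            exact hL (Nat.div_eq_of_lt (by omega))
          omega
        have hstep : pvStepB g b (pos, nbB, szB, lk) (false, c) =
            ((0:Int), nbB + 1, szB ++ [pos], false) := by
          simp only [pvStepB]
          rw [if_neg (by simp), if_pos ⟨hg, hgc⟩, if_pos hpb]
        rw [hstep]
        obtain ⟨E, hE0, hE1, hEa, hEb⟩ := ih 0 (((c.toNat % g.toNat : Nat) : Int))
          (nbA + 1 + ((c.toNat / g.toNat - 1 : Nat) : Int)) (nbB + 1)
          ((szA ++ [pos]) ++ List.replicate (c.toNat / g.toNat - 1) (0:Int)) (szB ++ [pos]) false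
          hcnt' hch' le_rfl (by positivity)
          (by have : c.toNat % g.toNat < g.toNat := Nat.mod_lt _ hg0; omega)
          (fun r2 h2 hf => absurd hf (hnothead r2 h2))
        refine ⟨E + ((c.toNat / g.toNat - 1 : Nat) : Int), by positivity, ?_, hEa, by omega⟩
        rintro ⟨r, hr, hrf, hrb⟩
        rcases List.mem_cons.mp hr with h | h
        · have h2 : 2 ≤ c.toNat / g.toNat := by
            rw [Nat.le_div_iff_mul_le hg0]
            rw [h] at hrb
            omega
          have : (1:Int) ≤ ((c.toNat / g.toNat - 1 : Nat) : Int) := by omega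
          omega
        · have := hE1 ⟨r, h, hrf, hrb⟩
          have h2 : (0:Int) ≤ ((c.toNat / g.toNat - 1 : Nat) : Int) := by positivity
          omega
    · -- in-state run
      rw [pvRunA_true g b c.toNat pos neg nbA szA]
      rw [if_neg (by omega : ¬ (c.toNat = 0))]
      have hstep : pvStepB g b (pos, nbB, szB, lk) (true, c) = (pos + c, nbB, szB, true) := by
        simp [pvStepB]
      rw [hstep, hcL]
      obtain ⟨E, hE0, hE1, hEa, hEb⟩ := ih (pos + c) 0 nbA nbB szA szB true
        hcnt' hch' (by omega) le_rfl (by omega) (fun _ _ _ => rfl)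
      refine ⟨E, hE0, ?_, hEa, hEb⟩
      rintro ⟨r, hr, hrf, hrb⟩
      rcases List.mem_cons.mp hr with h | h
      · exfalso; rw [h] at hrf; simp at hrf
      · exact hE1 ⟨r, h, hrf, hrb⟩

-- ===== VERDICT (by name: the statements are the Claim_ definitions above) =====
theorem detect_build_bursts_spec : Claim_unchanged_detect_build_bursts := by
  unfold Claim_unchanged_detect_build_bursts
  intro _builds gap_size burst_size states _ _
  unfold Spec_detect_build_bursts
  intro hnD
  simp only [detect_build_bursts, detect_build_bursts_alt]
  rw [pvFoldl_inb, pvFoldl_inb]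
  have hlen : ((_builds.length : Int)) = ((_builds.map (pvInb states)).length : Int) := by simp
  rw [hlen]
  rw [pvFoldFull gap_size burst_size ((_builds.map (pvInb states)).length : Int)
    (_builds.map (pvInb states)) 0 0 0 [] 0 (by simp)]
  obtain ⟨hcnts, hchain0, hexp⟩ := pvRle (_builds.map (pvInb states)) [] (by simp) (by simp)
  have hexp' : pvExpand ((_builds.map (pvInb states)).foldl pvRleStep []).reverse
      = _builds.map (pvInb states) := by simpa [pvExpand] using hexp
  have hcnts' : ∀ r ∈ ((_builds.map (pvInb states)).foldl pvRleStep []).reverse, 1 ≤ r.2 :=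
    fun r hr => hcnts r (List.mem_reverse.mp hr)
  have hchain : (((_builds.map (pvInb states)).foldl pvRleStep []).reverse).IsChain
      (fun a c => a.1 ≠ c.1) := by
    rw [List.isChain_reverse]
    exact hchain0.imp (fun a c h => h.symm)
  have Hb : 1 ≤ burst_size ∨ (1 ≤ gap_size →
      ∀ r ∈ ((_builds.map (pvInb states)).foldl pvRleStep []).reverse, r.1 = false → r.2 < 2 * gap_size) := by
    by_cases hb : 1 ≤ burst_size
    · exact Or.inl hb
    · refine Or.inr (fun hg r hr hrf => ?_)
      by_contra hcon
      apply hnD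
      refine ⟨hg, by omega, ?_⟩
      have hinf : List.replicate r.2.toNat r.1 <:+: pvExpand (((_builds.map (pvInb states)).foldl pvRleStep []).reverse) :=
        pvRun_infix _ r hr
      rw [hexp', hrf] at hinf
      obtain ⟨sL, tL, hst⟩ := hinf
      have hle : (2 * gap_size).toNat ≤ r.2.toNat := by omega
      have hk0 : 0 < (2 * gap_size).toNat := by omega
      refine ⟨sL.length, ?_, ?_, ?_⟩
      · rw [List.mem_range]
        show sL.length < (_builds.map (fun row => states.contains (PySem.Dict.getD (PySem.Dict.mk row) "state" ""))).length
        have : (_builds.map (fun row => states.contains (PySem.Dict.getD (PySem.Dict.mk row) "state" ""))) = _builds.map (pvInb states) := rfl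
        rw [this, ← hst]
        simp only [List.length_append, List.length_replicate]
        omega
      · have hdrop : ((_builds.map (fun row => states.contains (PySem.Dict.getD (PySem.Dict.mk row) "state" ""))).drop sL.length)
            = List.replicate r.2.toNat false ++ tL := by
          show ((_builds.map (pvInb states)).drop sL.length) = _
          rw [← hst, List.append_assoc, List.drop_left]
        rw [hdrop, List.take_append_of_le_length (by simpa using hle), List.take_replicate,
          Nat.min_eq_left hle]
        simp
      · have hdrop : ((_builds.map (fun row => states.contains (PySem.Dict.getD (PySem.Dict.mk row) "state" ""))).drop sL.length)
            = List.replicate r.2.toNat false ++ tL := by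
          show ((_builds.map (pvInb states)).drop sL.length) = _
          rw [← hst, List.append_assoc, List.drop_left]
        rw [hdrop, List.take_append_of_le_length (by simpa using hle), List.take_replicate]
        simp
  obtain ⟨negf, _, _, hrun⟩ := pvMainRuns gap_size burst_size
    (((_builds.map (pvInb states)).foldl pvRleStep []).reverse) 0 0 0 [] false
    Hb hcnts' hchain le_rfl (fun h => by omega) (fun _ _ _ => rfl)
  rw [hexp'] at hrun
  rw [hrun]
  have hlast : (_builds.map (pvInb states)).getLastD false =
      ((((_builds.map (pvInb states)).foldl pvRleStep []).reverse).foldl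
        (pvStepB gap_size burst_size) (0, 0, [], false)).2.2.2 := by
    rw [pvFoldB_lastIn]
    conv_lhs => rw [← hexp']
    rw [pvExpand_getLastD _ hcnts']
  rw [hlast]
  set W := (((_builds.map (pvInb states)).foldl pvRleStep []).reverse).foldl
    (pvStepB gap_size burst_size) (0, 0, [], false) with hW
  by_cases h1 : W.2.2.2 = true
  · by_cases h2 : W.1 ≥ burst_size
    · simp [pvTrail, h1, h2]
    · simp [pvTrail, h1, h2]
  · simp [pvTrail, h1]

theorem detect_build_bursts_changed : Claim_changed_detect_build_bursts := by
  unfold Claim_changed_detect_build_bursts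
  decide

theorem detect_build_bursts_tight : Claim_exact_detect_build_bursts := by
  unfold Claim_exact_detect_build_bursts
  intro _builds gap_size burst_size states _ _ hD
  obtain ⟨hg, hb, n, hn, hlen, hall⟩ := hD
  simp only [detect_build_bursts, detect_build_bursts_alt]
  rw [pvFoldl_inb, pvFoldl_inb]
  have hlen' : ((_builds.length : Int)) = ((_builds.map (pvInb states)).length : Int) := by simp
  rw [hlen']
  rw [pvFoldFull gap_size burst_size ((_builds.map (pvInb states)).length : Int)
    (_builds.map (pvInb states)) 0 0 0 [] 0 (by simp)]
  obtain ⟨hcnts, hchain0, hexp⟩ := pvRle (_builds.map (pvInb states)) [] (by simp) (by simp)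
  have hexp' : pvExpand ((_builds.map (pvInb states)).foldl pvRleStep []).reverse
      = _builds.map (pvInb states) := by simpa [pvExpand] using hexp
  have hcnts' : ∀ r ∈ ((_builds.map (pvInb states)).foldl pvRleStep []).reverse, 1 ≤ r.2 :=
    fun r hr => hcnts r (List.mem_reverse.mp hr)
  have hchain : (((_builds.map (pvInb states)).foldl pvRleStep []).reverse).IsChain
      (fun a c => a.1 ≠ c.1) := by
    rw [List.isChain_reverse]
    exact hchain0.imp (fun a c h => h.symm)
  -- the all-false window gives a long out-of-state run
  have hwrep : ((_builds.map (pvInb states)).drop n).take (2 * gap_size).toNat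
      = List.replicate (2 * gap_size).toNat false := by
    refine List.eq_replicate_iff.mpr ⟨hlen, ?_⟩
    intro x hx
    have := List.all_eq_true.mp hall x hx
    simpa using this
  have hinf : List.replicate (2 * gap_size).toNat false <:+: _builds.map (pvInb states) := by
    rw [← hwrep]
    exact (List.take_prefix _ _).isInfix.trans (List.drop_suffix _ _).isInfix
  rw [← hexp'] at hinf
  obtain ⟨r, hr, hrf, hrk⟩ := pvRep_infix_run _ _ (by omega) hcnts' hchain hinf
  have hrc : 2 * gap_size ≤ r.2 := by
    have h1 : 1 ≤ r.2 := hcnts' r hr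
    omega
  obtain ⟨E, hE0, hE1, hEa, hEb⟩ := pvMainRunsD gap_size burst_size hg hb
    (((_builds.map (pvInb states)).foldl pvRleStep []).reverse) 0 0 0 0 [] [] false
    hcnts' hchain le_rfl le_rfl (by omega) (fun _ _ _ => rfl)
  have hE : 1 ≤ E := hE1 ⟨r, hr, hrf, hrc⟩
  rw [hexp'] at hEa hEb
  have hlast : (_builds.map (pvInb states)).getLastD false =
      ((((_builds.map (pvInb states)).foldl pvRleStep []).reverse).foldl
        (pvStepB gap_size burst_size) (0, 0, [], false)).2.2.2 := by
    rw [pvFoldB_lastIn]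
    conv_lhs => rw [← hexp']
    rw [pvExpand_getLastD _ hcnts']
  rw [hlast]
  set W := (((_builds.map (pvInb states)).foldl pvRleStep []).reverse).foldl
    (pvStepB gap_size burst_size) (0, 0, [], false) with hW
  set SA := pvRunA gap_size burst_size (0, 0, 0, []) (_builds.map (pvInb states)) with hSA
  by_cases h1 : W.2.2.2 = true
  · by_cases h2 : W.1 ≥ burst_size
    · have hA1 : SA.1 ≥ burst_size := by rw [hEa]; exact h2
      have htr : pvTrail burst_size W.2.2.2 SA
          = (SA.1, SA.2.1, SA.2.2.1 + 1, SA.2.2.2 ++ [SA.1]) := by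
        simp only [pvTrail, h1, if_true, if_pos hA1]
      rw [htr, if_pos (And.intro h1 h2)]
      intro hcon
      rw [Prod.mk.injEq] at hcon
      obtain ⟨hc1, -⟩ := hcon
      dsimp only at hc1
      omega
    · have hA1 : ¬ (SA.1 ≥ burst_size) := by rw [hEa]; exact h2
      have htr : pvTrail burst_size W.2.2.2 SA = SA := by
        simp only [pvTrail, h1, if_true, if_neg hA1]
      rw [htr, if_neg (by rintro ⟨-, hx⟩; exact h2 hx)]
      intro hcon
      rw [Prod.mk.injEq] at hcon
      obtain ⟨hc1, -⟩ := hcon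
      dsimp only at hc1
      omega
  · have h1' : W.2.2.2 = false := by
      cases hx : W.2.2.2
      · rfl
      · exact absurd hx h1
    have htr : pvTrail burst_size W.2.2.2 SA = SA := by
      simp [pvTrail, h1']
    rw [htr, if_neg (by rintro ⟨hx, -⟩; exact h1 hx)]
    intro hcon
    rw [Prod.mk.injEq] at hcon
    obtain ⟨hc1, -⟩ := hcon
    dsimp only at hc1
    omega
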